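-- pv_equiv track=rewrite | github.com/joshuago78/aoc | 2016/day02.py | part1
-- ===== SOURCE A (Python) =====
-- def parse(raw_input):
--     return raw_input.strip().split('\n')
--
-- def part1(raw_input):
--     lines = parse(raw_input)
--     grid = [
--         [1,2,3],
--         [4,5,6],
--         [7,8,9]]
--     row,col = 1,1
--     buttons = ''
--     for line in lines:
--         for c in line:
--             match c:
--                 case 'U':
--                     if row > 0:
--                         row -= 1
--                 case 'D':
--                     if row < len(grid) - 1:
--                         row += 1
--                 case 'L':
--                     if col > 0:
--                         col -= 1
--                 case 'R':
--                     if col < len(grid) - 1: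
--                         col += 1
--         buttons += str(grid[row][col])
--     return buttons
-- ===== SOURCE B (Python) =====
-- def part1(raw_input):
--     # Precomputed keypad transition table: (button, direction) -> next button,
--     # with edge clamping baked in (missing keys mean "stay put").
--     moves = {
--         (1, 'U'): 1, (1, 'D'): 4, (1, 'L'): 1, (1, 'R'): 2,
--         (2, 'U'): 2, (2, 'D'): 5, (2, 'L'): 1, (2, 'R'): 3,
--         (3, 'U'): 3, (3, 'D'): 6, (3, 'L'): 2, (3, 'R'): 3,
--         (4, 'U'): 1, (4, 'D'): 7, (4, 'L'): 4, (4, 'R'): 5,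
--         (5, 'U'): 2, (5, 'D'): 8, (5, 'L'): 4, (5, 'R'): 6,
--         (6, 'U'): 3, (6, 'D'): 9, (6, 'L'): 5, (6, 'R'): 6,
--         (7, 'U'): 4, (7, 'D'): 7, (7, 'L'): 7, (7, 'R'): 8,
--         (8, 'U'): 5, (8, 'D'): 8, (8, 'L'): 7, (8, 'R'): 9,
--         (9, 'U'): 6, (9, 'D'): 9, (9, 'L'): 8, (9, 'R'): 9,
--     }
--     button = 5
--     out = []
--     for line in raw_input.strip().split('\n'):
--         for c in line:
--             button = moves.get((button, c), button)
--         out.append(str(button))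
--     return ''.join(out)
-- ===== Notes on version B (the rewrite author's own statement) =====
-- stated objective: idiomatic
-- what changed: Replaces the (row, col) coordinate state, the grid, and the four per-direction clamping branches with a single button value stepped through a precomputed (button, direction) -> next-button transition table with edge clamping baked in.
import Mathlib
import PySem

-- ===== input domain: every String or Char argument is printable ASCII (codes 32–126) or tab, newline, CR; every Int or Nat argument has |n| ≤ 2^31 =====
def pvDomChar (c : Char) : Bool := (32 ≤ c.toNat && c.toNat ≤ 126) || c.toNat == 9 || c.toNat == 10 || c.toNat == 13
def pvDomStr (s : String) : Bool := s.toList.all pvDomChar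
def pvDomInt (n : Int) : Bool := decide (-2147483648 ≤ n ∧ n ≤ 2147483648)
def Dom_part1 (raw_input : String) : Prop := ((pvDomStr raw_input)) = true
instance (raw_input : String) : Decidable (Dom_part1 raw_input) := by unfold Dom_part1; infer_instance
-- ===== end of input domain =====

-- B replaces A's (row, col) state and branch-per-direction clamping with a single button
-- value driven by a precomputed (button, direction) → button transition table (idiomatic rewrite; a timing run measured B faster by a constant factor).

-- ===== PORT A =====
-- helper: parse(raw_input) = raw_input.strip().split('\n')
def parseA (raw : String) : List (List Char) :=
  PySem.Chars.splitOn (PySem.Chars.strip raw.toList) ['\n']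

def gridA : List (List Int) := [[1,2,3],[4,5,6],[7,8,9]]

-- helper: the body of A's `match c` (Python match on 'U'/'D'/'L'/'R' with bounded moves)
def part1Move (grid : List (List Int)) (rc : Int × Int) (c : Char) : Int × Int :=
  if c = 'U' then (if rc.1 > 0 then (rc.1 - 1, rc.2) else rc)
  else if c = 'D' then (if rc.1 < (grid.length : Int) - 1 then (rc.1 + 1, rc.2) else rc)
  else if c = 'L' then (if rc.2 > 0 then (rc.1, rc.2 - 1) else rc)
  else if c = 'R' then (if rc.2 < (grid.length : Int) - 1 then (rc.1, rc.2 + 1) else rc)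
  else rc

-- helper: one iteration of A's outer `for line in lines` loop
def part1LineA (grid : List (List Int)) (st : (Int × Int) × List Char) (line : List Char) :
    (Int × Int) × List Char :=
  let rc := line.foldl (part1Move grid) st.1
  (rc, st.2 ++ PySem.Int.toChars (PySem.List.pyGetD (PySem.List.pyGetD grid rc.1 []) rc.2 0))

def part1 (raw_input : String) : String :=
  String.mk ((parseA raw_input).foldl (part1LineA gridA) ((1, 1), [])).2

-- ===== PORT B =====
-- the precomputed transition table `moves` of Source B
def movesB : PySem.Dict (Int × Char) Int := PySem.Dict.ofList [
  ((1,'U'),1), ((1,'D'),4), ((1,'L'),1), ((1,'R'),2),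
  ((2,'U'),2), ((2,'D'),5), ((2,'L'),1), ((2,'R'),3),
  ((3,'U'),3), ((3,'D'),6), ((3,'L'),2), ((3,'R'),3),
  ((4,'U'),1), ((4,'D'),7), ((4,'L'),4), ((4,'R'),5),
  ((5,'U'),2), ((5,'D'),8), ((5,'L'),4), ((5,'R'),6),
  ((6,'U'),3), ((6,'D'),9), ((6,'L'),5), ((6,'R'),6),
  ((7,'U'),4), ((7,'D'),7), ((7,'L'),7), ((7,'R'),8),
  ((8,'U'),5), ((8,'D'),8), ((8,'L'),7), ((8,'R'),9),
  ((9,'U'),6), ((9,'D'),9), ((9,'L'),8), ((9,'R'),9)]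

-- helper: one iteration of B's outer `for line in ...` loop
def part1LineB (st : Int × List (List Char)) (line : List Char) : Int × List (List Char) :=
  let b := line.foldl (fun b ch => movesB.getD (b, ch) b) st.1
  (b, st.2 ++ [PySem.Int.toChars b])

def part1_alt (raw_input : String) : String :=
  String.mk (PySem.Chars.join []
    ((PySem.Chars.splitOn (PySem.Chars.strip raw_input.toList) ['\n']).foldl part1LineB (5, [])).2)

-- ===== PRECONDITION & SPEC =====
def Spec_part1 (raw_input : String) (out : String) : Prop := out = part1_alt raw_input
instance (raw_input : String) (out : String) : Decidable (Spec_part1 raw_input out) := by unfold Spec_part1; infer_instance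

-- ===== CLAIM (what is proved, stated in full; the proofs are below) =====
def Claim_equal_part1 : Prop := ∀ (raw_input : String), Dom_part1 raw_input → Spec_part1 raw_input (part1 raw_input)

-- ===== LEMMAS AND PROOFS =====
-- the loop invariant's bounds on A's (row, col)
def Bounds (rc : Int × Int) : Prop := 0 ≤ rc.1 ∧ rc.1 < 3 ∧ 0 ≤ rc.2 ∧ rc.2 < 3

lemma prodBeq {α β : Type} [BEq α] [BEq β] (a c : α) (b d : β) :
    ((a, b) == (c, d)) = ((a == c) && (b == d)) := rfl

set_option maxRecDepth 8192 in
lemma moves_default (b : Int) (ch : Char) (h1 : ch ≠ 'U') (h2 : ch ≠ 'D') (h3 : ch ≠ 'L') (h4 : ch ≠ 'R') :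
    movesB.getD (b, ch) b = b := by
  have hm : movesB.items = [
    ((1,'U'),1), ((1,'D'),4), ((1,'L'),1), ((1,'R'),2),
  ((2,'U'),2), ((2,'D'),5), ((2,'L'),1), ((2,'R'),3),
  ((3,'U'),3), ((3,'D'),6), ((3,'L'),2), ((3,'R'),3),
  ((4,'U'),1), ((4,'D'),7), ((4,'L'),4), ((4,'R'),5),
  ((5,'U'),2), ((5,'D'),8), ((5,'L'),4), ((5,'R'),6),
  ((6,'U'),3), ((6,'D'),9), ((6,'L'),5), ((6,'R'),6),
  ((7,'U'),4), ((7,'D'),7), ((7,'L'),7), ((7,'R'),8),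
  ((8,'U'),5), ((8,'D'),8), ((8,'L'),7), ((8,'R'),9),
  ((9,'U'),6), ((9,'D'),9), ((9,'L'),8), ((9,'R'),9)] := by decide
  have hU : ('U' == ch) = false := by simp [Ne.symm h1]
  have hD : ('D' == ch) = false := by simp [Ne.symm h2]
  have hL : ('L' == ch) = false := by simp [Ne.symm h3]
  have hR : ('R' == ch) = false := by simp [Ne.symm h4]
  simp [PySem.Dict.getD, PySem.Dict.get?, hm, List.find?, prodBeq, hU, hD, hL, hR]

set_option maxRecDepth 8192 in
lemma step_sim (rc : Int × Int) (h : Bounds rc) (ch : Char) :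
    movesB.getD (3 * rc.1 + rc.2 + 1, ch) (3 * rc.1 + rc.2 + 1)
      = 3 * (part1Move gridA rc ch).1 + (part1Move gridA rc ch).2 + 1
    ∧ Bounds (part1Move gridA rc ch) := by
  obtain ⟨r, c⟩ := rc
  obtain ⟨h1, h2, h3, h4⟩ := h
  by_cases e1 : ch = 'U'
  · subst e1; interval_cases r <;> interval_cases c <;> exact ⟨by decide, by unfold Bounds; decide⟩
  by_cases e2 : ch = 'D'
  · subst e2; interval_cases r <;> interval_cases c <;> exact ⟨by decide, by unfold Bounds; decide⟩
  by_cases e3 : ch = 'L'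
  · subst e3; interval_cases r <;> interval_cases c <;> exact ⟨by decide, by unfold Bounds; decide⟩
  by_cases e4 : ch = 'R'
  · subst e4; interval_cases r <;> interval_cases c <;> exact ⟨by decide, by unfold Bounds; decide⟩
  · have hmv : part1Move gridA (r, c) ch = (r, c) := by
      simp [part1Move, e1, e2, e3, e4]
    rw [hmv]
    exact ⟨moves_default _ ch e1 e2 e3 e4, h1, h2, h3, h4⟩

lemma line_sim (line : List Char) (rc : Int × Int) (h : Bounds rc) :
    line.foldl (fun b ch => movesB.getD (b, ch) b) (3 * rc.1 + rc.2 + 1)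
      = 3 * (line.foldl (part1Move gridA) rc).1 + (line.foldl (part1Move gridA) rc).2 + 1
    ∧ Bounds (line.foldl (part1Move gridA) rc) := by
  induction line generalizing rc with
  | nil => exact ⟨rfl, h⟩
  | cons ch rest ih =>
    obtain ⟨heq, hb⟩ := step_sim rc h ch
    simpa [List.foldl_cons, heq] using ih (part1Move gridA rc ch) hb

set_option maxRecDepth 8192 in
lemma grid_digit (rc : Int × Int) (h : Bounds rc) :
    PySem.List.pyGetD (PySem.List.pyGetD gridA rc.1 []) rc.2 0 = 3 * rc.1 + rc.2 + 1 := by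
  obtain ⟨r, c⟩ := rc
  obtain ⟨h1, h2, h3, h4⟩ := h
  interval_cases r <;> interval_cases c <;> decide

lemma join_nil_flatten (l : List (List Char)) : PySem.Chars.join [] l = l.flatten := by
  induction l with
  | nil => rfl
  | cons x xs ih =>
    cases xs with
    | nil => simp [PySem.Chars.join, List.intercalate]
    | cons y ys =>
      simp only [PySem.Chars.join, List.intercalate, List.intersperse] at *
      simp_all

lemma fold_sim (lines : List (List Char)) (rc : Int × Int) (h : Bounds rc)
    (acc : List Char) (out : List (List Char)) (hacc : acc = out.flatten) :
    (lines.foldl (part1LineA gridA) (rc, acc)).2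
      = ((lines.foldl part1LineB (3 * rc.1 + rc.2 + 1, out)).2).flatten := by
  induction lines generalizing rc acc out with
  | nil => simpa using hacc
  | cons line rest ih =>
    obtain ⟨heq, hb⟩ := line_sim line rc h
    have hdig := grid_digit _ hb
    simp only [List.foldl_cons, part1LineA, part1LineB, heq, hdig]
    exact ih _ hb _ _ (by simp [hacc])

-- ===== VERDICT (by name: the statement is the Claim_ definition above) =====
theorem part1_spec : Claim_equal_part1 := by
  intro raw _
  unfold Spec_part1 part1 part1_alt
  rw [join_nil_flatten]
  exact congrArg String.mk
    (fold_sim (parseA raw) (1, 1) (by exact ⟨by norm_num, by norm_num, by norm_num, by norm_num⟩) [] [] rfl)
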